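-- pv_equiv track=rewrite | github.com/yusufbavas/Convert-Sentences-Written-English-Letters | conver-lettes.py | all_possible_sentence
-- ===== SOURCE A (Python) =====
-- def all_possible_sentence(sentence):
--
--     result = []
--     result.append(sentence)
--     rule = str.maketrans("iouscg", "ıöüşçğ")
--     eng_letters = "iouscg"
--
--     for i in range(len(sentence)):
--         if sentence[i] in eng_letters:
--             res2 = []
--             for element in result:
--                 l = list(element)
--                 l[i] = str(sentence[i]).translate(rule)
--                 res2.append(l)
--             for l in res2:
--                 str1 = ''.join(l)
--                 result.append(str1)
--     return result
-- ===== SOURCE B (Python) =====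
-- def all_possible_sentence(sentence):
--     trans = dict(zip("iouscg", "\u0131\u00f6\u00fc\u015f\u00e7\u011f"))
--     positions = [i for i, c in enumerate(sentence) if c in trans]
--     result = []
--     for mask in range(1 << len(positions)):
--         chars = list(sentence)
--         for j, p in enumerate(positions):
--             if (mask >> j) & 1:
--                 chars[p] = trans[sentence[p]]
--         result.append(''.join(chars))
--     return result
-- ===== Notes on version B (the rewrite author's own statement) =====
-- stated objective: simpler
-- what changed: Replaces A's repeated doubling of a growing result list (re-scanning and re-joining all previous strings at each letter position) by a single bitmask enumeration over a precomputed list of translatable positions, building each output string directly from the mask.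
import Mathlib
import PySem

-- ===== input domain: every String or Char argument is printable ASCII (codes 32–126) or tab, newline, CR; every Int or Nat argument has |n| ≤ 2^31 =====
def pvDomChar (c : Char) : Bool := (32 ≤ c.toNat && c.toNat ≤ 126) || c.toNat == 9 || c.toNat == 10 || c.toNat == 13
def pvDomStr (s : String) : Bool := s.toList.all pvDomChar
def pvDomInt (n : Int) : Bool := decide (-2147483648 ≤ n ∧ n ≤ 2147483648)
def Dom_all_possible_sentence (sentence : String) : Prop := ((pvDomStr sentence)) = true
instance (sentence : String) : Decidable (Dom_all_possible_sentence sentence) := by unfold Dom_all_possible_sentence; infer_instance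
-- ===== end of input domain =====

-- B replaces A's repeated doubling of the result list by a single bitmask enumeration over
-- the precomputed translatable positions (objective: simpler); same outputs in the same order.

-- the translation table str.maketrans("iouscg", "ıöüşçğ") applied to one character
def pvTr (c : Char) : Char :=
  if c = 'i' then 'ı' else if c = 'o' then 'ö' else if c = 'u' then 'ü'
  else if c = 's' then 'ş' else if c = 'c' then 'ç' else if c = 'g' then 'ğ' else c

-- membership test `c in "iouscg"`
def pvIsEng (c : Char) : Bool :=
  c = 'i' || c = 'o' || c = 'u' || c = 's' || c = 'c' || c = 'g'

-- ===== PORT A =====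
-- literal transliteration of A: result starts as [sentence]; for each index i of the sentence
-- whose character is an English letter, append to result the translated copy of every element.
-- (i is always in range, so `l[i] = …` is ported as List.set with getD at a safe default.)
def all_possible_sentence (sentence : String) : List String :=
  let cs := sentence.toList
  (List.range cs.length).foldl
    (fun result i =>
      let c := cs.getD i ' '
      if pvIsEng c then
        let t := pvTr c
        result ++ result.map (fun element => String.ofList ((element.toList).set i t))
      else result)
    [sentence]

-- ===== PORT B =====
-- transliteration of Source B: positions = indices with a translatable character; one output per
-- bitmask, bit j (LSB first) selecting translation at positions[j].
def all_possible_sentence_alt (sentence : String) : List String :=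
  let cs := sentence.toList
  let positions := (List.range cs.length).filter (fun i => pvIsEng (cs.getD i ' '))
  (List.range (2 ^ positions.length)).map (fun mask =>
    String.ofList (positions.zipIdx.foldl
      (fun chars pj => if (mask >>> pj.2) % 2 = 1 then chars.set pj.1 (pvTr (cs.getD pj.1 ' ')) else chars)
      cs))

-- ===== PRECONDITION & SPEC =====
def Spec_all_possible_sentence (sentence : String) (out : List String) : Prop := out = all_possible_sentence_alt sentence
instance (sentence : String) (out : List String) : Decidable (Spec_all_possible_sentence sentence out) := by unfold Spec_all_possible_sentence; infer_instance

-- ===== CLAIM (what is proved, stated in full; the proofs are below) =====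
def Claim_equal_all_possible_sentence : Prop := ∀ (sentence : String), Dom_all_possible_sentence sentence → Spec_all_possible_sentence sentence (all_possible_sentence sentence)

-- ===== LEMMAS AND PROOFS =====

-- apply f at the positions selected by the bits of m (LSB = head of the list)
def pvApplyMask {α : Type} (f : ℕ → α → α) : List ℕ → ℕ → α → α
  | [], _, x => x
  | p :: qs, m, x => pvApplyMask f qs (m / 2) (if m % 2 = 1 then f p x else x)

theorem pvFlatMap_pair {α : Type} (g : ℕ → List α) (n : ℕ) :
    (List.range (2 * n)).flatMap g
      = (List.range n).flatMap (fun m => g (2 * m) ++ g (2 * m + 1)) := by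
  induction n with
  | zero => simp
  | succ k ih =>
    have h2 : 2 * (k + 1) = (2 * k) + 1 + 1 := by omega
    rw [h2, List.range_succ, List.range_succ, List.range_succ,
        List.flatMap_append, List.flatMap_append, List.flatMap_append, ih]
    simp [List.append_assoc]

theorem pvDoubling_eq {α : Type} (f : ℕ → α → α) (ps : List ℕ) (L : List α) :
    ps.foldl (fun r p => r ++ r.map (f p)) L
      = (List.range (2 ^ ps.length)).flatMap (fun m => L.map (pvApplyMask f ps m)) := by
  induction ps generalizing L with
  | nil => simp [pvApplyMask]
  | cons p qs ih =>
    rw [List.foldl_cons, ih]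
    have hpow : 2 ^ (p :: qs).length = 2 * 2 ^ qs.length := by
      simp [List.length_cons, pow_succ, Nat.mul_comm]
    rw [hpow, pvFlatMap_pair]
    refine List.flatMap_congr ?_ |>.symm
    intro m hm
    have h1 : ∀ x : α, pvApplyMask f (p :: qs) (2 * m) x = pvApplyMask f qs m x := by
      intro x
      simp [pvApplyMask, Nat.mul_mod_right]
    have h2 : ∀ x : α, pvApplyMask f (p :: qs) (2 * m + 1) x = pvApplyMask f qs m (f p x) := by
      intro x
      have hdiv : (2 * m + 1) / 2 = m := by omega
      simp [pvApplyMask, hdiv]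
    simp only [List.map_append, List.map_map]
    congr 1
    · exact List.map_congr_left fun x _ => h1 x
    · exact List.map_congr_left fun x _ => h2 x

theorem pvZipFold_eq {α : Type} (f : ℕ → α → α) (mask : ℕ) (ps : List ℕ)
    (off : ℕ) (x : α) :
    (ps.zipIdx off).foldl
        (fun chars pj => if (mask >>> pj.2) % 2 = 1 then f pj.1 chars else chars) x
      = pvApplyMask f ps (mask >>> off) x := by
  induction ps generalizing off x with
  | nil => simp [pvApplyMask]
  | cons p qs ih =>
    simp only [List.zipIdx_cons, List.foldl_cons]
    rw [ih]
    have hshift : mask >>> (off + 1) = (mask >>> off) / 2 := by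
      rw [Nat.shiftRight_succ]
    rw [hshift]
    rfl

-- the string-level step commutes with the char-level step through String.ofList
theorem pvApplyMask_str (v : ℕ → Char) (ps : List ℕ) (m : ℕ) (l : List Char) :
    pvApplyMask (fun p s => String.ofList ((s.toList).set p (v p))) ps m (String.ofList l)
      = String.ofList (pvApplyMask (fun p cl => cl.set p (v p)) ps m l) := by
  induction ps generalizing m l with
  | nil => simp [pvApplyMask]
  | cons p qs ih =>
    simp only [pvApplyMask]
    by_cases h : m % 2 = 1 <;> simp [h, ih, String.toList_ofList]

-- the whole equivalence, stated over the character list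
theorem pvMain (cs : List Char) :
    (List.range cs.length).foldl
        (fun result i =>
          if pvIsEng (cs.getD i ' ') then
            result ++ result.map (fun element => String.ofList ((element.toList).set i (pvTr (cs.getD i ' '))))
          else result)
        [String.ofList cs]
      = (List.range (2 ^ ((List.range cs.length).filter (fun i => pvIsEng (cs.getD i ' '))).length)).map
          (fun mask =>
            String.ofList
              ((((List.range cs.length).filter (fun i => pvIsEng (cs.getD i ' '))).zipIdx).foldl
                (fun chars pj => if (mask >>> pj.2) % 2 = 1 then chars.set pj.1 (pvTr (cs.getD pj.1 ' ')) else chars)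
                cs)) := by
  set P := (List.range cs.length).filter (fun i => pvIsEng (cs.getD i ' ')) with hP
  have hfilter :
      (List.range cs.length).foldl
        (fun result i =>
          if pvIsEng (cs.getD i ' ') then
            result ++ result.map (fun element => String.ofList ((element.toList).set i (pvTr (cs.getD i ' '))))
          else result)
        [String.ofList cs]
      = P.foldl
          (fun r p => r ++ r.map (fun element => String.ofList ((element.toList).set p (pvTr (cs.getD p ' ')))))
          [String.ofList cs] := by
    rw [hP, List.foldl_filter]
  rw [hfilter,
    pvDoubling_eq (fun p s => String.ofList ((s.toList).set p (pvTr (cs.getD p ' ')))) P [String.ofList cs]]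
  have hsing : ∀ m : ℕ,
      [String.ofList cs].map (pvApplyMask (fun p s => String.ofList ((s.toList).set p (pvTr (cs.getD p ' ')))) P m)
        = [String.ofList (pvApplyMask (fun p cl => cl.set p (pvTr (cs.getD p ' '))) P m cs)] := by
    intro m
    simp only [List.map_cons, List.map_nil]
    rw [pvApplyMask_str]
  simp only [hsing]
  rw [← List.map_eq_flatMap]
  refine List.map_congr_left ?_
  intro m _
  rw [pvZipFold_eq (fun p cl => cl.set p (pvTr (cs.getD p ' '))) m P 0 cs, Nat.shiftRight_zero]

-- ===== VERDICT (by name: the statement is the Claim_ definition above) =====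
theorem all_possible_sentence_spec : Claim_equal_all_possible_sentence := by
  intro sentence _
  unfold Spec_all_possible_sentence all_possible_sentence all_possible_sentence_alt
  have h := pvMain sentence.toList
  rw [String.ofList_toList] at h
  exact h
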